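-- pv_equiv track=rewrite | github.com/pravash02/python_module_programs | codility/zalando_codility.py | solution_max_emp_attendee
-- ===== SOURCE A (Python) =====
-- def solution_max_emp_attendee(E):
--     """
--     we need to consider all possible pairs of two days during which the training can take place. For each pair,
--     we will count the number of employees who are available on at least one of these two days.
--     Finally, we will return the maximum count
--     Iterate over all possible pairs of two days from the next 10 days.
--     For each pair of two days, iterate over all employees and count the number of employees who are available on
--     at least one of these two days.
--     """
--     emp_lst_len = len(E)
--     max_cnt = 0
--
--     for day1 in range(9):
--         for day2 in range(day1 + 1, 10):
--             cnt = 0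
--
--             for emp in range(emp_lst_len):
--                 if str(day1) in E[emp] or str(day2) in E[emp]:
--                     cnt += 1
--             if cnt > max_cnt:
--                 max_cnt = cnt
--     return max_cnt
-- ===== SOURCE B (Python) =====
-- def solution_max_emp_attendee(E):
--     # One pass over the employees builds per-day and per-ordered-pair availability
--     # tables; the best pair is then found by inclusion-exclusion without re-scanning E.
--     single = [0] * 10
--     both = [[0] * 10 for _ in range(10)]
--     for s in E:
--         for d1 in range(10):
--             if str(d1) in s:
--                 single[d1] += 1
--                 for d2 in range(d1 + 1, 10):
--                     if str(d2) in s: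
--                         both[d1][d2] += 1
--     best = 0
--     for d1 in range(9):
--         for d2 in range(d1 + 1, 10):
--             avail = single[d1] + single[d2] - both[d1][d2]
--             if avail > best:
--                 best = avail
--     return best
-- ===== Notes on version B (the rewrite author's own statement) =====
-- stated objective: faster
-- what changed: B replaces A's 45 scans of E (one per day pair) by a single pass over E that builds per-day and per-pair availability tables, then picks the best pair by inclusion-exclusion without touching E again.
import Mathlib
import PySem

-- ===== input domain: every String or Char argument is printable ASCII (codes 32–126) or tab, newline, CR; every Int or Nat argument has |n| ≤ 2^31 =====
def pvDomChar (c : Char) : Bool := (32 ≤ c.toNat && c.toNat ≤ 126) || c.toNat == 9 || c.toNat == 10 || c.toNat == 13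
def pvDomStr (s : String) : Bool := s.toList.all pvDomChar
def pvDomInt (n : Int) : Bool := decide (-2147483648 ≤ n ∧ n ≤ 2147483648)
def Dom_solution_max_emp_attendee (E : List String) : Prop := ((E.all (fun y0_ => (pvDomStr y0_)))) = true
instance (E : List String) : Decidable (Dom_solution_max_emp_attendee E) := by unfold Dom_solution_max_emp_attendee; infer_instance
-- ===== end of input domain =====

-- B builds per-day / per-pair availability tables in one pass over E and combines
-- them by inclusion-exclusion, instead of A's rescanning E for each of the 45 pairs.

-- ===== PORT A =====
def solution_max_emp_attendee (E : List String) : Int :=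
  let empLstLen : Int := E.length
  (PySem.List.pyRange 0 9 1).foldl (fun maxCnt day1 =>
    (PySem.List.pyRange (day1 + 1) 10 1).foldl (fun maxCnt day2 =>
      let cnt : Int := (PySem.List.pyRange 0 empLstLen 1).foldl (fun cnt emp =>
        if PySem.Str.isIn (PySem.Int.toStr day1) (PySem.List.pyGetD E emp "") ||
           PySem.Str.isIn (PySem.Int.toStr day2) (PySem.List.pyGetD E emp "") then cnt + 1 else cnt) 0
      if maxCnt < cnt then cnt else maxCnt) maxCnt) 0

-- ===== PORT B =====
-- single[d] += 1 for the mutable list `single` of Source B (tables modelled as functions)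
def pvUpd1 (f : Int → Int) (a : Int) : Int → Int := fun x => if x = a then f a + 1 else f x
-- both[a][b] += 1 for the mutable table `both` of Source B
def pvUpd2 (g : Int → Int → Int) (a b : Int) : Int → Int → Int :=
  fun x y => if x = a ∧ y = b then g a b + 1 else g x y

-- body of Source B's 'for d1 in range(10):' for one employee string s
def pvProcDay (s : String) (st : (Int → Int) × (Int → Int → Int)) (d1 : Int) :
    (Int → Int) × (Int → Int → Int) :=
  if PySem.Str.isIn (PySem.Int.toStr d1) s then
    (PySem.List.pyRange (d1 + 1) 10 1).foldl (fun st d2 =>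
      if PySem.Str.isIn (PySem.Int.toStr d2) s then (st.1, pvUpd2 st.2 d1 d2) else st)
      (pvUpd1 st.1 d1, st.2)
  else st

-- Source B's first loop: 'for s in E: for d1 in range(10): …'
def pvTables (E : List String) : (Int → Int) × (Int → Int → Int) :=
  E.foldl (fun st s => (PySem.List.pyRange 0 10 1).foldl (pvProcDay s) st)
    (fun _ => 0, fun _ _ => 0)

def solution_max_emp_attendee_alt (E : List String) : Int :=
  let tabs := pvTables E
  (PySem.List.pyRange 0 9 1).foldl (fun best d1 =>
    (PySem.List.pyRange (d1 + 1) 10 1).foldl (fun best d2 =>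
      let avail : Int := tabs.1 d1 + tabs.1 d2 - tabs.2 d1 d2
      if best < avail then avail else best) best) 0

-- ===== PRECONDITION & SPEC =====
def Spec_solution_max_emp_attendee (E : List String) (out : Int) : Prop := out = solution_max_emp_attendee_alt E
instance (E : List String) (out : Int) : Decidable (Spec_solution_max_emp_attendee E out) := by unfold Spec_solution_max_emp_attendee; infer_instance

-- ===== CLAIM (what is proved, stated in full; the proofs are below) =====
def Claim_equal_solution_max_emp_attendee : Prop := ∀ (E : List String), Dom_solution_max_emp_attendee E → Spec_solution_max_emp_attendee E (solution_max_emp_attendee E)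


-- ===== LEMMAS AND PROOFS =====

-- pvProcDay with the per-day availability test "str(d) in s" abstracted to c
def pvGenDay (c : Int → Bool) (st : (Int → Int) × (Int → Int → Int)) (d1 : Int) :
    (Int → Int) × (Int → Int → Int) :=
  if c d1 then
    (PySem.List.pyRange (d1 + 1) 10 1).foldl (fun st d2 =>
      if c d2 then (st.1, pvUpd2 st.2 d1 d2) else st)
      (pvUpd1 st.1 d1, st.2)
  else st

lemma pvProcDay_eq (s : String) :
    pvProcDay s = pvGenDay (fun d => PySem.Str.isIn (PySem.Int.toStr d) s) := rfl

lemma pvGenInner_fst (c : Int → Bool) (d1 : Int) (l : List Int)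
    (st : (Int → Int) × (Int → Int → Int)) :
    (l.foldl (fun st d2 => if c d2 then (st.1, pvUpd2 st.2 d1 d2) else st) st).1 = st.1 := by
  induction l generalizing st with
  | nil => rfl
  | cons a t ih =>
    simp only [List.foldl_cons]
    rw [ih]
    split <;> rfl

lemma pvGenInner_snd (c : Int → Bool) (d1 : Int) (l : List Int) (hl : l.Nodup)
    (st : (Int → Int) × (Int → Int → Int)) (x y : Int) :
    (l.foldl (fun st d2 => if c d2 then (st.1, pvUpd2 st.2 d1 d2) else st) st).2 x y
      = st.2 x y + (if x = d1 ∧ y ∈ l ∧ c y then 1 else 0) := by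
  induction l generalizing st with
  | nil => simp
  | cons a t ih =>
    have ha : a ∉ t := (List.nodup_cons.mp hl).1
    have ht : t.Nodup := (List.nodup_cons.mp hl).2
    simp only [List.foldl_cons]
    rw [ih ht]
    cases hp : c a with
    | true =>
      by_cases hx : x = d1
      · subst hx
        by_cases hya : y = a
        · subst hya; simp [pvUpd2, ha, hp]
        · simp [pvUpd2, hya]
      · simp [pvUpd2, hx]
    | false =>
      by_cases hya : y = a
      · subst hya; simp [hp, ha]
      · simp [hya]

lemma pvGenDay_fst (c : Int → Bool) (st : (Int → Int) × (Int → Int → Int)) (d1 x : Int) :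
    (pvGenDay c st d1).1 x = st.1 x + (if x = d1 ∧ c d1 then 1 else 0) := by
  unfold pvGenDay
  cases hp : c d1 with
  | true =>
    rw [if_pos rfl, pvGenInner_fst]
    by_cases hx : x = d1
    · subst hx; simp [pvUpd1]
    · simp [pvUpd1, hx]
  | false => simp

lemma pvGenDay_snd (c : Int → Bool) (st : (Int → Int) × (Int → Int → Int)) (d1 x y : Int) :
    (pvGenDay c st d1).2 x y
      = st.2 x y + (if x = d1 ∧ c d1 ∧ c y ∧ d1 < y ∧ y < 10 then 1 else 0) := by
  unfold pvGenDay
  cases hp : c d1 with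
  | true =>
    rw [if_pos rfl, pvGenInner_snd c d1 _ (PySem.List.nodup_pyRange_one _ _) _ x y]
    simp only [PySem.List.mem_pyRange_one]
    have hiff : (x = d1 ∧ (d1 + 1 ≤ y ∧ y < 10) ∧ c y = true)
        ↔ (x = d1 ∧ true = true ∧ c y = true ∧ d1 < y ∧ y < 10) := by
      constructor
      · rintro ⟨h1, ⟨h2, h3⟩, h4⟩; exact ⟨h1, rfl, h4, by omega, h3⟩
      · rintro ⟨h1, _, h4, h2, h3⟩; exact ⟨h1, ⟨by omega, h3⟩, h4⟩
    rw [if_congr hiff rfl rfl]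
    simp
  | false => simp

lemma pvGenDays_fst (c : Int → Bool) (l : List Int) (hl : l.Nodup)
    (st : (Int → Int) × (Int → Int → Int)) (x : Int) :
    ((l.foldl (pvGenDay c) st).1) x = st.1 x + (if x ∈ l ∧ c x then 1 else 0) := by
  induction l generalizing st with
  | nil => simp
  | cons a t ih =>
    have ha : a ∉ t := (List.nodup_cons.mp hl).1
    have ht : t.Nodup := (List.nodup_cons.mp hl).2
    simp only [List.foldl_cons]
    rw [ih ht, pvGenDay_fst]
    by_cases hxa : x = a
    · subst hxa; simp [ha]
    · simp [hxa]

lemma pvGenDays_snd (c : Int → Bool) (l : List Int) (hl : l.Nodup)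
    (st : (Int → Int) × (Int → Int → Int)) (x y : Int) :
    ((l.foldl (pvGenDay c) st).2) x y
      = st.2 x y + (if x ∈ l ∧ c x ∧ c y ∧ x < y ∧ y < 10 then 1 else 0) := by
  induction l generalizing st with
  | nil => simp
  | cons a t ih =>
    have ha : a ∉ t := (List.nodup_cons.mp hl).1
    have ht : t.Nodup := (List.nodup_cons.mp hl).2
    simp only [List.foldl_cons]
    rw [ih ht, pvGenDay_snd]
    by_cases hxa : x = a
    · subst hxa; simp [ha]
    · simp [hxa]

lemma pvEfold_fst (E : List String) (st : (Int → Int) × (Int → Int → Int)) (x : Int) :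
    ((E.foldl (fun st s => (PySem.List.pyRange 0 10 1).foldl (pvProcDay s) st) st).1) x
      = st.1 x + (if 0 ≤ x ∧ x < 10 then
          (E.countP (fun s => PySem.Str.isIn (PySem.Int.toStr x) s) : Int) else 0) := by
  induction E generalizing st with
  | nil => simp
  | cons s E ih =>
    simp only [List.foldl_cons]
    rw [ih, pvProcDay_eq s,
      pvGenDays_fst _ _ (PySem.List.nodup_pyRange_one _ _) st x]
    simp only [PySem.List.mem_pyRange_one, List.countP_cons]
    cases hb : PySem.Str.isIn (PySem.Int.toStr x) s <;>
      by_cases hr : 0 ≤ x ∧ x < 10 <;>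
      first
        | (simp [hr]; omega)
        | simp [hr]

lemma pvEfold_snd (E : List String) (st : (Int → Int) × (Int → Int → Int)) (x y : Int) :
    ((E.foldl (fun st s => (PySem.List.pyRange 0 10 1).foldl (pvProcDay s) st) st).2) x y
      = st.2 x y + (if 0 ≤ x ∧ x < y ∧ y < 10 then
          (E.countP (fun s => PySem.Str.isIn (PySem.Int.toStr x) s &&
            PySem.Str.isIn (PySem.Int.toStr y) s) : Int) else 0) := by
  induction E generalizing st with
  | nil => simp
  | cons s E ih =>
    simp only [List.foldl_cons]
    rw [ih, pvProcDay_eq s,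
      pvGenDays_snd _ _ (PySem.List.nodup_pyRange_one _ _) st x y]
    simp only [PySem.List.mem_pyRange_one, List.countP_cons]
    cases hbx : PySem.Str.isIn (PySem.Int.toStr x) s with
    | true =>
      cases hby : PySem.Str.isIn (PySem.Int.toStr y) s with
      | true =>
        by_cases hr : 0 ≤ x ∧ x < y ∧ y < 10
        · have h10 : 0 ≤ x ∧ x < 10 := ⟨hr.1, by omega⟩
          simp [hr, h10]
          omega
        · have hc1 : ¬ ((0 ≤ x ∧ x < 10) ∧ true = true ∧ true = true ∧ x < y ∧ y < 10) := by
            rintro ⟨ha, _, _, hb, hc⟩; exact hr ⟨ha.1, hb, hc⟩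
          simp [hr, hc1]
          omega
      | false =>
        by_cases hr : 0 ≤ x ∧ x < y ∧ y < 10 <;> simp [hr]
    | false =>
      by_cases hr : 0 ≤ x ∧ x < y ∧ y < 10 <;> simp [hr]

lemma pvTables_fst (E : List String) (x : Int) (hx : 0 ≤ x ∧ x < 10) :
    (pvTables E).1 x
      = (E.countP (fun s => PySem.Str.isIn (PySem.Int.toStr x) s) : Int) := by
  unfold pvTables
  rw [pvEfold_fst, if_pos hx]
  simp

lemma pvTables_snd (E : List String) (x y : Int) (h : 0 ≤ x ∧ x < y ∧ y < 10) :
    (pvTables E).2 x y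
      = (E.countP (fun s => PySem.Str.isIn (PySem.Int.toStr x) s &&
          PySem.Str.isIn (PySem.Int.toStr y) s) : Int) := by
  unfold pvTables
  rw [pvEfold_snd, if_pos h]
  simp

lemma pvCountA (E : List String) (d1 d2 : Int) :
    (PySem.List.pyRange 0 (E.length : Int) 1).foldl (fun cnt emp =>
      if PySem.Str.isIn (PySem.Int.toStr d1) (PySem.List.pyGetD E emp "") ||
         PySem.Str.isIn (PySem.Int.toStr d2) (PySem.List.pyGetD E emp "") then cnt + 1 else cnt) 0
      = (E.countP (fun s => PySem.Str.isIn (PySem.Int.toStr d1) s ||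
          PySem.Str.isIn (PySem.Int.toStr d2) s) : Int) := by
  rw [PySem.List.foldl_pyRange_zero_pyGetD' E ""
    (fun (cnt : Int) (s : String) =>
      if PySem.Str.isIn (PySem.Int.toStr d1) s || PySem.Str.isIn (PySem.Int.toStr d2) s
      then cnt + 1 else cnt) 0]
  rw [PySem.List.foldl_if_add_one]
  simp

lemma pvInclExcl (p q : String → Bool) (E : List String) :
    E.countP (fun s => p s || q s) + E.countP (fun s => p s && q s)
      = E.countP p + E.countP q := by
  induction E with
  | nil => simp
  | cons s E ih =>
    simp only [List.countP_cons]
    cases hp : p s <;> cases hq : q s <;> simp [hp, hq] <;> omega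

-- ===== VERDICT (by name: the statement is the Claim_ definition above) =====
theorem solution_max_emp_attendee_spec : Claim_equal_solution_max_emp_attendee := by
  intro E _
  unfold Spec_solution_max_emp_attendee solution_max_emp_attendee solution_max_emp_attendee_alt
  apply PySem.List.foldl_congr_mem
  intro acc d1 hd1
  apply PySem.List.foldl_congr_mem
  intro acc2 d2 hd2
  rw [PySem.List.mem_pyRange_one] at hd1 hd2
  have h1 : 0 ≤ d1 ∧ d1 < 10 := by omega
  have h2 : 0 ≤ d2 ∧ d2 < 10 := by omega
  have h12 : 0 ≤ d1 ∧ d1 < d2 ∧ d2 < 10 := by omega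
  have hcnt : ((PySem.List.pyRange 0 (E.length : Int) 1).foldl (fun cnt emp =>
      if PySem.Str.isIn (PySem.Int.toStr d1) (PySem.List.pyGetD E emp "") ||
         PySem.Str.isIn (PySem.Int.toStr d2) (PySem.List.pyGetD E emp "") then cnt + 1 else cnt) 0)
      = (pvTables E).1 d1 + (pvTables E).1 d2 - (pvTables E).2 d1 d2 := by
    rw [pvCountA, pvTables_fst E d1 h1, pvTables_fst E d2 h2, pvTables_snd E d1 d2 h12]
    have := pvInclExcl (fun s => PySem.Str.isIn (PySem.Int.toStr d1) s)
      (fun s => PySem.Str.isIn (PySem.Int.toStr d2) s) E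
    omega
  simp only [hcnt]
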